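-- pv_equiv track=rewrite | github.com/ahonorat/sand-box | python/FlatIndex.py | flatIndex
-- ===== SOURCE A (Python) =====
-- def computeMuls(dims, nbDims):
--     """Compute list of the successive dimension multiplications [1, Z, Z*Y, Z*Y*X, ...]"""
--     muls = [1]
--     for i in range(1, nbDims+1):
--         if (dims[-i] < 1):
--             raise Exception("All dimensions must be positive integers.")
--         muls.append(muls[i-1]*dims[-i])
--     return muls
--
-- def flatIndex(index, dims):
--     """Compute each column index, counting from last dimension [..., Z]"""
--     nbDims = len(dims)
--     indexes = []
--     muls = computeMuls(dims, nbDims)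
--     muls.reverse()
--     if (index < 0 or index >= muls[0]):
--         raise Exception("Wrong flat index (out of bounds)")
--     for i in range(nbDims):
--         #divisor = functools.reduce(operator.mul, dims[i+1:], 1)
--         divisor = muls[i+1]
--         indexes.append(index//divisor)
--         index = index % divisor
--     return indexes
-- ===== SOURCE B (Python) =====
-- def flatIndex(index, dims):
--     """Compute each column index, counting from last dimension [..., Z]"""
--     total = 1
--     for d in dims:
--         if d < 1:
--             raise Exception("All dimensions must be positive integers.")
--         total *= d
--     if index < 0 or index >= total:
--         raise Exception("Wrong flat index (out of bounds)")
--     rems = []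
--     for d in reversed(dims):
--         index, r = divmod(index, d)
--         rems.append(r)
--     rems.reverse()
--     return rems
-- ===== Notes on version B (the rewrite author's own statement) =====
-- stated objective: simpler
-- what changed: B drops the precomputed multiplier table entirely: it validates dimensions while computing the total product in one pass, then peels coordinates least-significant-first with successive divmod over the reversed dims and reverses the remainders, instead of building and reversing a suffix-product list and dividing by big precomputed divisors most-significant-first.
import Mathlib
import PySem

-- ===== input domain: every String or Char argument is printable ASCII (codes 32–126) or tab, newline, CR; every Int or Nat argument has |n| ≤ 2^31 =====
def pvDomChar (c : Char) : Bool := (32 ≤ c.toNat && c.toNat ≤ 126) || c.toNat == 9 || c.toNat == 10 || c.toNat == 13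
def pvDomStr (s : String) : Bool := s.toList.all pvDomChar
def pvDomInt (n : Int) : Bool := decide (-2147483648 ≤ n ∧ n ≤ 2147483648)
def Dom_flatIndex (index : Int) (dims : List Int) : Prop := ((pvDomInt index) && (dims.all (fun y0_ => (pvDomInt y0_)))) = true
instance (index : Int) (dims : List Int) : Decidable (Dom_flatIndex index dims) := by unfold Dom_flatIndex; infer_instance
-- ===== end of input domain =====

-- B: validates dims while computing the total product, then peels coordinates
-- least-significant-first by successive divmod (no multiplier table); simpler decomposition.


-- ===== PORT A =====
-- A's loop 'for i in range(1, nbDims+1)' reads dims[-i] (dims reversed, in order) and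
-- muls[i-1] (= the last element appended so far): ported exactly as a fold over
-- dims.reverse carrying the muls list.  'none' = the Exception A raises (outside Pre_).
def computeMuls (dims : List Int) (nbDims : Int) : Option (List Int) :=
  let _ := nbDims  -- kept for fidelity with A's signature; the loop covers all of dims reversed
  dims.reverse.foldlM
    (fun (muls : List Int) d =>
      if d < 1 then none else some (muls ++ [muls.getLast! * d]))
    [1]

def flatIndex (index : Int) (dims : List Int) : List Int :=
  -- nbDims = len(dims)
  match computeMuls dims (dims.length : Int) with
  | none => []  -- Exception "All dimensions must be positive integers." (outside Pre_)
  | some muls0 =>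
    -- muls.reverse()
    match muls0.reverse with
    | [] => []  -- unreachable: muls always contains at least the initial 1
    | m0 :: rest =>
      if index < 0 ∨ m0 ≤ index then []  -- Exception "Wrong flat index" (outside Pre_)
      else
        -- 'for i in range(nbDims): divisor = muls[i+1]' enumerates rest in order,
        -- appending index // divisor and updating index to index % divisor
        (rest.foldl
          (fun (st : List Int × Int) divisor =>
            (st.1 ++ [PySem.Int.floordiv st.2 divisor], PySem.Int.mod st.2 divisor))
          ([], index)).1

-- ===== PORT B =====
def flatIndex_alt (index : Int) (dims : List Int) : List Int :=
  -- one validation pass computing total = product of dims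
  match dims.foldlM
      (fun (total : Int) d => if d < 1 then none else some (total * d)) (1 : Int) with
  | none => []  -- Exception (outside Pre_)
  | some total =>
    if index < 0 ∨ total ≤ index then []  -- Exception (outside Pre_)
    else
      -- for d in reversed(dims): index, r = divmod(index, d); rems.append(r) — then rems.reverse()
      ((dims.reverse.foldl
        (fun (st : Int × List Int) d =>
          (PySem.Int.floordiv st.1 d, st.2 ++ [PySem.Int.mod st.1 d]))
        (index, ([] : List Int))).2).reverse

-- ===== PRECONDITION & SPEC =====
-- Pre_ excludes exactly the inputs on which A raises: some dimension < 1, or the flat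
-- index outside [0, product of dims).
def Pre_flatIndex (index : Int) (dims : List Int) : Prop :=
  (∀ d ∈ dims, 1 ≤ d) ∧ 0 ≤ index ∧ index < dims.prod
instance (index : Int) (dims : List Int) : Decidable (Pre_flatIndex index dims) := by
  unfold Pre_flatIndex; infer_instance

def pvWitness_flatIndex : Int × List Int := (7, [2, 3, 4])

def Spec_flatIndex (index : Int) (dims : List Int) (out : List Int) : Prop :=
  out = flatIndex_alt index dims
instance (index : Int) (dims : List Int) (out : List Int) : Decidable (Spec_flatIndex index dims out) := by
  unfold Spec_flatIndex; infer_instance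

-- ===== CLAIM (what is proved, stated in full; the proofs are below) =====
def Claim_equal_flatIndex : Prop :=
  ∀ (index : Int) (dims : List Int), Dom_flatIndex index dims →
    Pre_flatIndex index dims → Spec_flatIndex index dims (flatIndex index dims)

-- ===== LEMMAS AND PROOFS =====

-- Reference recursion both ports are reduced to: most-significant coordinate first.
def refIdx (index : Int) : List Int → List Int
  | [] => []
  | _ :: ds =>
    PySem.Int.floordiv index ds.prod :: refIdx (PySem.Int.mod index ds.prod) ds

-- suffix products: sufProds [x,y,z] = [x*y*z, y*z, z, 1]
def sufProds : List Int → List Int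
  | [] => [1]
  | d :: ds => d * ds.prod :: sufProds ds

theorem sufProds_head (ds : List Int) :
    sufProds ds = ds.prod :: (sufProds ds).tail := by
  cases ds <;> simp [sufProds]

theorem computeMuls_fold (xs : List Int) (muls : List Int) (L : Int)
    (hL : muls.getLast! = L) (hx : ∀ d ∈ xs, 1 ≤ d) :
    xs.foldlM
      (fun (muls : List Int) d =>
        if d < 1 then none else some (muls ++ [muls.getLast! * d]))
      muls
    = some (xs.foldl (fun (acc : List Int × Int) d => (acc.1 ++ [acc.2 * d], acc.2 * d))
        (muls, L)).1 := by
  induction xs generalizing muls L with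
  | nil => simp
  | cons x xs ih =>
    have hx1 : ¬ x < 1 := by have := hx x (by simp); omega
    simp only [List.foldlM_cons, hx1, List.foldl_cons, if_false]
    rw [hL]
    exact ih (muls ++ [L * x]) (L * x) (by simp) (fun d hd => hx d (by simp [hd]))

theorem fold_pair (dims : List Int) (h : ∀ d ∈ dims, 1 ≤ d) :
    dims.reverse.foldl (fun (acc : List Int × Int) d => (acc.1 ++ [acc.2 * d], acc.2 * d))
        ([1], 1)
      = ((sufProds dims).reverse, dims.prod) := by
  induction dims with
  | nil => simp [sufProds]
  | cons d ds ih =>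
    have hds : ∀ e ∈ ds, 1 ≤ e := fun e he => h e (by simp [he])
    simp only [List.reverse_cons, List.foldl_append, List.foldl_cons, List.foldl_nil]
    rw [ih hds]
    simp [sufProds, mul_comm]

theorem computeMuls_spec (dims : List Int) (h : ∀ d ∈ dims, 1 ≤ d) :
    computeMuls dims dims.length = some (sufProds dims).reverse := by
  unfold computeMuls
  rw [computeMuls_fold dims.reverse [1] 1 (by simp) (by simpa using h), fold_pair dims h]

-- A's main loop over (sufProds dims).tail computes refIdx
theorem loopA_spec (dims : List Int) (acc : List Int) (idx : Int) :
    ((sufProds dims).tail.foldl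
      (fun (st : List Int × Int) divisor =>
        (st.1 ++ [PySem.Int.floordiv st.2 divisor], PySem.Int.mod st.2 divisor))
      (acc, idx)).1 = acc ++ refIdx idx dims := by
  induction dims generalizing acc idx with
  | nil => simp [sufProds, refIdx]
  | cons d ds ih =>
    simp only [sufProds, List.tail_cons]
    rw [sufProds_head ds]
    simp only [List.foldl_cons, refIdx]
    rw [ih]
    simp

theorem prod_pos (ds : List Int) (h : ∀ d ∈ ds, 1 ≤ d) : 0 < ds.prod := by
  induction ds with
  | nil => simp
  | cons d ds ih =>
    have h1 := h d (by simp)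
    have h2 := ih (fun e he => h e (by simp [he]))
    simp only [List.prod_cons]
    positivity

-- digit identities
theorem fdiv_fdiv (idx P d : Int) (hP : 0 < P) (hd : 0 < d) :
    PySem.Int.floordiv (PySem.Int.floordiv idx P) d = PySem.Int.floordiv idx (d * P) := by
  rw [PySem.Int.floordiv_eq_ediv_of_pos hP, PySem.Int.floordiv_eq_ediv_of_pos hd,
    PySem.Int.floordiv_eq_ediv_of_pos (show (0:Int) < d * P by positivity),
    Int.ediv_ediv_of_nonneg (le_of_lt hP), mul_comm]

theorem mod_fdiv (idx P d : Int) (hP : 0 < P) (hd : 0 < d) :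
    PySem.Int.mod (PySem.Int.floordiv idx P) d
      = PySem.Int.floordiv (PySem.Int.mod idx (d * P)) P := by
  rw [PySem.Int.floordiv_eq_ediv_of_pos hP, PySem.Int.mod_eq_emod_of_pos hd,
    PySem.Int.mod_eq_emod_of_pos (show (0:Int) < d * P by positivity),
    PySem.Int.floordiv_eq_ediv_of_pos hP]
  have h1 : idx % (d * P) = idx - d * P * (idx / (d * P)) := by
    have := Int.emod_add_mul_ediv idx (d * P); linarith
  rw [h1]
  have h2 : idx - d * P * (idx / (d * P)) = idx + (-(idx / (d * P)) * d) * P := by ring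
  rw [h2, Int.add_mul_ediv_right _ _ (show P ≠ 0 by omega)]
  have h4 : idx / (d * P) = idx / P / d := by
    rw [Int.ediv_ediv_of_nonneg (le_of_lt hP), mul_comm]
  rw [Int.emod_def, h4]
  ring

theorem mod_mod (idx P d : Int) (hP : 0 < P) (hd : 0 < d) :
    PySem.Int.mod (PySem.Int.mod idx (d * P)) P = PySem.Int.mod idx P := by
  rw [PySem.Int.mod_eq_emod_of_pos (show (0:Int) < d * P by positivity),
    PySem.Int.mod_eq_emod_of_pos hP, PySem.Int.mod_eq_emod_of_pos hP]
  exact Int.emod_emod_of_dvd idx ⟨d, mul_comm d P⟩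

-- B's loop over dims.reverse computes refIdx of (idx mod prod dims), reversed
theorem loopB_spec (ds : List Int) (h : ∀ d ∈ ds, 1 ≤ d) (idx : Int) (acc : List Int) :
    ds.reverse.foldl
      (fun (st : Int × List Int) d =>
        (PySem.Int.floordiv st.1 d, st.2 ++ [PySem.Int.mod st.1 d]))
      (idx, acc)
    = (PySem.Int.floordiv idx ds.prod,
        acc ++ (refIdx (PySem.Int.mod idx ds.prod) ds).reverse) := by
  induction ds generalizing idx acc with
  | nil => simp [refIdx, PySem.Int.floordiv, PySem.Int.mod]
  | cons d ds ih =>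
    have hd : 0 < d := by have := h d (by simp); omega
    have hds : ∀ e ∈ ds, 1 ≤ e := fun e he => h e (by simp [he])
    have hP : 0 < ds.prod := prod_pos ds hds
    simp only [List.reverse_cons, List.foldl_append, List.foldl_cons, List.foldl_nil]
    rw [ih hds idx acc]
    simp only [List.prod_cons, refIdx, List.reverse_cons]
    refine Prod.ext ?_ ?_
    · exact fdiv_fdiv idx ds.prod d hP hd
    · simp only [List.append_assoc]
      rw [mod_fdiv idx ds.prod d hP hd, mod_mod idx ds.prod d hP hd]

theorem total_fold (ds : List Int) (h : ∀ d ∈ ds, 1 ≤ d) (t : Int) :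
    ds.foldlM (fun (total : Int) d => if d < 1 then none else some (total * d)) t
      = some (t * ds.prod) := by
  induction ds generalizing t with
  | nil => simp
  | cons d ds ih =>
    have hd : ¬ d < 1 := by have := h d (by simp); omega
    rw [List.foldlM_cons]
    simp only [hd, if_false]
    rw [show ((some (t * d) >>= fun init =>
        ds.foldlM (fun (total : Int) d => if d < 1 then none else some (total * d)) init)
      = ds.foldlM (fun (total : Int) d => if d < 1 then none else some (total * d)) (t * d))
      from rfl]
    rw [ih (fun e he => h e (by simp [he])) (t * d)]
    simp [mul_assoc]

-- ===== VERDICT (by name: the statement is the Claim_ definition above) =====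
theorem flatIndex_spec : Claim_equal_flatIndex := by
  intro index dims _hdom hpre
  obtain ⟨hdims, hlo, hhi⟩ := hpre
  unfold Spec_flatIndex flatIndex flatIndex_alt
  rw [computeMuls_spec dims hdims]
  simp only [List.reverse_reverse]
  rw [sufProds_head dims]
  have hcond : ¬ (index < 0 ∨ dims.prod ≤ index) := by omega
  simp only [hcond, if_false]
  rw [loopA_spec dims [] index]
  rw [total_fold dims hdims 1]
  simp only [one_mul, hcond, if_false]
  rw [loopB_spec dims hdims index []]
  have hmod : PySem.Int.mod index dims.prod = index := by
    rw [PySem.Int.mod_eq_emod_of_pos (prod_pos dims hdims)]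
    exact Int.emod_eq_of_lt hlo hhi
  simp [hmod]
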